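-- pv_equiv track=rewrite | github.com/rrdrake/vvtools | vvt/libvvtest/FilterExpressions.py | split_but_retain_separator
-- ===== SOURCE A (Python) =====
-- def split_but_retain_separator( expr, separator ):
--     ""
--     seplist = []
--
--     splitlist = list( expr.split( separator ) )
--     last_token = len(splitlist) - 1
--
--     for i,tok in enumerate( splitlist ):
--         seplist.append( tok )
--         if i < last_token:
--             seplist.append( separator )
--
--     return seplist
-- ===== SOURCE B (Python) =====
-- def split_but_retain_separator(expr, separator):
--     if not separator:
--         raise ValueError("empty separator")
--     out = []
--     rest = expr
--     i = rest.find(separator)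
--     while i >= 0:
--         out.append(rest[:i])
--         out.append(separator)
--         rest = rest[i + len(separator):]
--         i = rest.find(separator)
--     out.append(rest)
--     return out
-- ===== Notes on version B (the rewrite author's own statement) =====
-- stated objective: alternative
-- what changed: B never calls str.split: it scans the string directly with str.find in a while loop, slicing off each token and appending token and separator as it goes, instead of A's split-then-interleave pass over the token list.
import Mathlib
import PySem

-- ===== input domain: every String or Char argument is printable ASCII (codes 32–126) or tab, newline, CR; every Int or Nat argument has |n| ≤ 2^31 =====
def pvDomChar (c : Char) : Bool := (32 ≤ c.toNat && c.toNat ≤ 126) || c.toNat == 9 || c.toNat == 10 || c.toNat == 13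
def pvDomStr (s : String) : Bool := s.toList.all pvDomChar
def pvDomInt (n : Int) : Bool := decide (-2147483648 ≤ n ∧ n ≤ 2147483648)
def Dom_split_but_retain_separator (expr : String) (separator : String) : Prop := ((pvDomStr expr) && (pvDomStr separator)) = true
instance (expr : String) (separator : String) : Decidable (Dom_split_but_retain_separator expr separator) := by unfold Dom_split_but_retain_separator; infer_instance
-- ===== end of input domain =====

-- B never calls str.split: it scans the string with str.find in a while loop,
-- slicing off each token and emitting token and separator directly, instead of
-- A's split-then-interleave pass over the token list; objective: alternative.
-- Pre_ excludes only separator = "" (both A and B raise ValueError there).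

-- ===== PORT A =====
-- the for-loop over enumerate(splitlist) with accumulator seplist
def pvALoop (separator : String) (last_token : Int) : Int → List String → List String → List String
  | _, acc, [] => acc
  | i, acc, tok :: rest =>
      let acc := acc ++ [tok]
      let acc := if i < last_token then acc ++ [separator] else acc
      pvALoop separator last_token (i + 1) acc rest

def split_but_retain_separator (expr : String) (separator : String) : List String :=
  match PySem.Str.split? expr separator with
  | none => []   -- unreachable under Pre_: Python raises ValueError here
  | some splitlist =>
      let last_token : Int := (splitlist.length : Int) - 1
      pvALoop separator last_token 0 [] splitlist

-- ===== PORT B =====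
-- the while loop 'while i >= 0: out += [rest[:i], separator]; rest = rest[i+len(sep):]; i = rest.find(sep)'
-- (fuel = |expr|+1 only makes the recursion total; with separator ≠ "" it never runs out)
def pvBGo (sep : List Char) : Nat → List Char → List (List Char) → List (List Char)
  | 0, rest, out => out ++ [rest]
  | fuel+1, rest, out =>
      let i := PySem.Chars.find rest sep
      if 0 ≤ i then
        pvBGo sep fuel (rest.drop (i.toNat + sep.length)) (out ++ [rest.take i.toNat, sep])
      else out ++ [rest]

def split_but_retain_separator_alt (expr : String) (separator : String) : List String :=
  if separator = "" then []   -- unreachable under Pre_: Python raises ValueError here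
  else (pvBGo separator.toList (expr.toList.length + 1) expr.toList []).map String.ofList

-- ===== PRECONDITION & SPEC =====
-- Pre_ excludes exactly separator = "", on which str.split (A) and B's guard raise ValueError
def Pre_split_but_retain_separator (expr : String) (separator : String) : Prop := separator ≠ ""
instance (expr : String) (separator : String) : Decidable (Pre_split_but_retain_separator expr separator) := by unfold Pre_split_but_retain_separator; infer_instance

def pvWitness_split_but_retain_separator : String × String := ("a and b or c", " ")

def Spec_split_but_retain_separator (expr : String) (separator : String) (out : List String) : Prop := out = split_but_retain_separator_alt expr separator
instance (expr : String) (separator : String) (out : List String) : Decidable (Spec_split_but_retain_separator expr separator out) := by unfold Spec_split_but_retain_separator; infer_instance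

-- ===== CLAIM (what is proved, stated in full; the proofs are below) =====
def Claim_equal_split_but_retain_separator : Prop := ∀ (expr : String) (separator : String), Dom_split_but_retain_separator expr separator → Pre_split_but_retain_separator expr separator → Spec_split_but_retain_separator expr separator (split_but_retain_separator expr separator)

-- ===== LEMMAS AND PROOFS =====

-- the common intermediate form: tokens interleaved with the separator
def pvIv {α : Type} (sep : α) : List α → List α
  | [] => []
  | [t] => [t]
  | t :: rest => t :: sep :: pvIv sep rest

theorem pvIv_map {α β : Type} (f : α → β) (sep : α) : ∀ (ts : List α),
    (pvIv sep ts).map f = pvIv (f sep) (ts.map f) := by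
  intro ts
  induction ts with
  | nil => simp [pvIv]
  | cons t rest ih =>
    cases rest with
    | nil => simp [pvIv]
    | cons u rs => simp [pvIv] at ih ⊢; exact ih

theorem pvALoop_eq_iv (sep : String) : ∀ (ts : List String) (i : Int) (acc : List String),
    pvALoop sep (i + (ts.length : Int) - 1) i acc ts = acc ++ pvIv sep ts := by
  intro ts
  induction ts with
  | nil => intro i acc; simp [pvALoop, pvIv]
  | cons t rest ih =>
    intro i acc
    cases rest with
    | nil => simp [pvALoop, pvIv]
    | cons u rs =>
      have hlt : i < i + ((t :: u :: rs).length : Int) - 1 := by simp; omega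
      have harith : i + ((t :: u :: rs).length : Int) - 1
          = (i + 1) + ((u :: rs).length : Int) - 1 := by simp; omega
      conv_lhs => rw [pvALoop]
      rw [if_pos hlt, harith, ih]
      simp [pvIv]

-- find points at the first occurrence: the converse direction
theorem pv_find_eq_of_first (l sub : List Char) (k : Nat)
    (h1 : sub <+: l.drop k) (h2 : ∀ i < k, ¬ sub <+: l.drop i) :
    PySem.Chars.find l sub = (k : Int) := by
  have hinf : sub <:+: l := by
    rcases h1 with ⟨t, ht⟩
    exact ⟨l.take k, t, by rw [List.append_assoc, ht, List.take_append_drop]⟩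
  have hnn : 0 ≤ PySem.Chars.find l sub := (PySem.Chars.find_nonneg_iff l sub).2 hinf
  obtain ⟨hpre, hmin⟩ := PySem.Chars.find_spec hnn
  have : (PySem.Chars.find l sub).toNat = k := by
    by_contra hne
    rcases Nat.lt_or_ge (PySem.Chars.find l sub).toNat k with hlt | hge
    · exact h2 _ hlt hpre
    · exact hmin k (lt_of_le_of_ne hge (Ne.symm hne)) h1
  omega

-- unfolding splitOn via find: first token up to the first separator occurrence
theorem pv_go_acc (sL : List Char) (hsep : sL ≠ []) : ∀ (n : Nat) (l : List Char), l.length ≤ n →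
    ∀ (fuel fuel' : Nat) (cur : List Char) (acc : List (List Char)),
    l.length < fuel → l.length < fuel' →
    PySem.Chars.splitOn.go sL fuel l cur acc =
      acc.reverse ++ ((cur.reverse ++ (PySem.Chars.splitOn.go sL fuel' l [] []).headI)
        :: (PySem.Chars.splitOn.go sL fuel' l [] []).tail) := by
  intro n
  induction n with
  | zero =>
    intro l hl fuel fuel' cur acc hf hf'
    interval_cases hlen : l.length
    · obtain rfl : l = [] := List.length_eq_zero_iff.1 hlen
      obtain ⟨f, rfl⟩ : ∃ f, fuel = f + 1 := ⟨fuel - 1, by omega⟩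
      obtain ⟨f', rfl⟩ : ∃ f', fuel' = f' + 1 := ⟨fuel' - 1, by omega⟩
      rw [PySem.Chars.splitOn.go, PySem.Chars.splitOn.go]
      all_goals simp
  | succ n ih =>
    intro l hl fuel fuel' cur acc hf hf'
    cases l with
    | nil =>
      obtain ⟨f, rfl⟩ : ∃ f, fuel = f + 1 := ⟨fuel - 1, by omega⟩
      obtain ⟨f', rfl⟩ : ∃ f', fuel' = f' + 1 := ⟨fuel' - 1, by omega⟩
      rw [PySem.Chars.splitOn.go, PySem.Chars.splitOn.go]
      all_goals simp
    | cons c rest =>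
      obtain ⟨f, rfl⟩ : ∃ f, fuel = f + 1 := ⟨fuel - 1, by omega⟩
      obtain ⟨f', rfl⟩ : ∃ f', fuel' = f' + 1 := ⟨fuel' - 1, by omega⟩
      rw [PySem.Chars.splitOn.go, PySem.Chars.splitOn.go]
      by_cases hpre : sL.isPrefixOf (c :: rest)
      · simp only [hpre, if_true]
        have hslen : 1 ≤ sL.length := List.length_pos_of_ne_nil hsep
        have hdrop : (List.drop sL.length (c :: rest)).length ≤ n := by
          simp [List.length_drop] at *; omega
        have hdroplt : (List.drop sL.length (c :: rest)).length < f := by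
          simp [List.length_drop] at *; omega
        have hd2 : (List.drop sL.length (c :: rest)).length
            < (List.drop sL.length (c :: rest)).length + 1 := by omega
        rw [ih _ hdrop f _ [] (cur.reverse :: acc) hdroplt hd2,
            ih _ hdrop f' _ [] ([].reverse :: []) (by simp [List.length_drop] at *; omega) hd2]
        simp
      · simp only [hpre]
        have hrest : rest.length ≤ n := by simp at hl; omega
        have hd2 : rest.length < rest.length + 1 := by omega
        rw [ih _ hrest f _ (c :: cur) acc (by simp at hf; omega) hd2,
            ih _ hrest f' _ [c] [] (by simp at hf'; omega) hd2]
        simp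

theorem pv_splitOn_ne_nil (sL : List Char) (hsep : sL ≠ []) (l : List Char) :
    PySem.Chars.splitOn l sL ≠ [] := by
  unfold PySem.Chars.splitOn
  rw [pv_go_acc sL hsep l.length l le_rfl _ (l.length + 1) [] [] (by omega) (by omega)]
  simp

theorem pv_splitOn_unfold (sL : List Char) (hsep : sL ≠ []) : ∀ (n : Nat) (l : List Char), l.length ≤ n →
    PySem.Chars.splitOn l sL =
      if PySem.Chars.find l sL = -1 then [l]
      else l.take (PySem.Chars.find l sL).toNat
        :: PySem.Chars.splitOn (l.drop ((PySem.Chars.find l sL).toNat + sL.length)) sL := by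
  intro n
  induction n with
  | zero =>
    intro l hl
    obtain rfl : l = [] := List.length_eq_zero_iff.1 (by omega)
    have hfind : PySem.Chars.find [] sL = -1 := by
      rw [PySem.Chars.find_eq_neg_one_iff]
      intro h
      exact hsep (List.eq_nil_of_infix_nil h)
    rw [hfind]; simp
    unfold PySem.Chars.splitOn
    rw [PySem.Chars.splitOn.go]; all_goals simp
  | succ n ih =>
    intro l hl
    cases l with
    | nil =>
      have hfind : PySem.Chars.find [] sL = -1 := by
        rw [PySem.Chars.find_eq_neg_one_iff]
        intro h
        exact hsep (List.eq_nil_of_infix_nil h)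
      rw [hfind]; simp
      unfold PySem.Chars.splitOn
      rw [PySem.Chars.splitOn.go]; all_goals simp
    | cons c rest =>
      by_cases hpre : sL <+: (c :: rest)
      · -- separator at position 0
        have hfind : PySem.Chars.find (c :: rest) sL = (0 : Int) :=
          pv_find_eq_of_first _ _ 0 (by simpa using hpre) (by omega)
        rw [hfind]
        simp only [if_neg (by omega : ¬ (0 : Int) = -1), Int.toNat_zero, List.take_zero,
          Nat.zero_add]
        -- LHS: one go step
        have hslen : 1 ≤ sL.length := List.length_pos_of_ne_nil hsep
        conv_lhs => unfold PySem.Chars.splitOn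
        rw [PySem.Chars.splitOn.go]
        rw [if_pos (by rwa [List.isPrefixOf_iff_prefix])]
        set l' := List.drop sL.length (c :: rest) with hl'
        have hlen' : l'.length < (c :: rest).length := by
          simp [hl', List.length_drop]; omega
        rw [pv_go_acc sL hsep l'.length l' le_rfl _ (l'.length + 1) [] [[].reverse]
            (by simp at hlen' ⊢; omega) (by omega)]
        have : PySem.Chars.splitOn l' sL
            = ((PySem.Chars.splitOn.go sL (l'.length + 1) l' [] []).headI
              :: (PySem.Chars.splitOn.go sL (l'.length + 1) l' [] []).tail) := by
          unfold PySem.Chars.splitOn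
          rw [pv_go_acc sL hsep l'.length l' le_rfl _ (l'.length + 1) [] [] (by omega) (by omega)]
          simp
        rw [this]
        simp
      · -- no separator at position 0: recurse on rest
        have hrest : rest.length ≤ n := by simp at hl; omega
        have hstep : PySem.Chars.splitOn (c :: rest) sL =
            ((c :: (PySem.Chars.splitOn rest sL).headI) :: (PySem.Chars.splitOn rest sL).tail) := by
          conv_lhs => unfold PySem.Chars.splitOn
          rw [PySem.Chars.splitOn.go]
          rw [if_neg (by rwa [List.isPrefixOf_iff_prefix])]
          rw [pv_go_acc sL hsep rest.length rest le_rfl _ (rest.length + 1) [c] []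
              (by simp only [List.length_cons]; omega) (by omega)]
          unfold PySem.Chars.splitOn
          rw [pv_go_acc sL hsep rest.length rest le_rfl _ (rest.length + 1) [] [] (by omega) (by omega)]
          simp
        by_cases hfr : PySem.Chars.find rest sL = -1
        · have hfind : PySem.Chars.find (c :: rest) sL = -1 := by
            rw [PySem.Chars.find_eq_neg_one_iff] at hfr ⊢
            intro h
            rcases List.infix_cons_iff.1 h with h0 | h1
            · exact hpre h0
            · exact hfr h1
          rw [hfind, if_pos rfl, hstep, ih rest hrest, if_pos hfr]
          simp
        · have hnn : 0 ≤ PySem.Chars.find rest sL := by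
            have := PySem.Chars.neg_one_le_find (s := rest) (sub := sL)
            omega
          set j := (PySem.Chars.find rest sL).toNat with hj
          obtain ⟨hpre', hmin'⟩ := PySem.Chars.find_spec hnn
          have hfind : PySem.Chars.find (c :: rest) sL = ((j + 1 : Nat) : Int) := by
            apply pv_find_eq_of_first
            · simpa using hpre'
            · intro i hi
              cases i with
              | zero => simpa using hpre
              | succ i' =>
                have : i' < j := by omega
                simpa using hmin' i' this
          rw [hfind]
          rw [if_neg (by omega : ¬ ((j + 1 : Nat) : Int) = -1)]
          rw [hstep, ih rest hrest, if_neg hfr, ← hj]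
          simp only [Int.toNat_natCast]
          have hdropEq : List.drop (j + 1 + sL.length) (c :: rest) = List.drop (j + sL.length) rest := by
            rw [show j + 1 + sL.length = (j + sL.length) + 1 from by omega, List.drop_succ_cons]
          rw [hdropEq]
          simp
  
-- B's find loop produces the interleaved token list
theorem pvBGo_eq_iv (sL : List Char) (hsep : sL ≠ []) : ∀ (n : Nat) (rest : List Char), rest.length ≤ n →
    ∀ (fuel : Nat) (out : List (List Char)), rest.length < fuel →
    pvBGo sL fuel rest out = out ++ pvIv sL (PySem.Chars.splitOn rest sL) := by
  intro n
  induction n with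
  | zero =>
    intro rest hr fuel out hf
    obtain rfl : rest = [] := List.length_eq_zero_iff.1 (by omega)
    obtain ⟨f, rfl⟩ : ∃ f, fuel = f + 1 := ⟨fuel - 1, by omega⟩
    have hfind : PySem.Chars.find [] sL = -1 := by
      rw [PySem.Chars.find_eq_neg_one_iff]
      intro h
      exact hsep (List.eq_nil_of_infix_nil h)
    simp only [pvBGo]
    rw [pv_splitOn_unfold sL hsep 0 [] (by simp), if_pos hfind, hfind]
    norm_num [pvIv]
  | succ n ih =>
    intro rest hr fuel out hf
    obtain ⟨f, rfl⟩ : ∃ f, fuel = f + 1 := ⟨fuel - 1, by omega⟩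
    rw [pvBGo]
    rw [pv_splitOn_unfold sL hsep (n+1) rest hr]
    by_cases hfind : PySem.Chars.find rest sL = -1
    · simp only [hfind]
      norm_num [pvIv]
    · have hnn : 0 ≤ PySem.Chars.find rest sL := by
        have := PySem.Chars.neg_one_le_find (s := rest) (sub := sL)
        omega
      simp only [if_pos hnn]
      rw [if_neg hfind]
      set j := (PySem.Chars.find rest sL).toNat with hj
      have hslen : 1 ≤ sL.length := List.length_pos_of_ne_nil hsep
      have hlen' : (rest.drop (j + sL.length)).length ≤ n := by
        have : 0 < rest.length := by
          rcases rest with - | ⟨d, ds⟩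
          · exact absurd ((PySem.Chars.find_eq_neg_one_iff [] sL).2
              (fun h => hsep (List.eq_nil_of_infix_nil h))) hfind
          · simp
        simp [List.length_drop]; omega
      rw [ih _ hlen' f _ (by
        have : 0 < rest.length := by
          rcases rest with - | ⟨d, ds⟩
          · exact absurd ((PySem.Chars.find_eq_neg_one_iff [] sL).2
              (fun h => hsep (List.eq_nil_of_infix_nil h))) hfind
          · simp
        simp [List.length_drop] at *; omega)]
      have hne := pv_splitOn_ne_nil sL hsep (rest.drop (j + sL.length))
      rcases h' : PySem.Chars.splitOn (rest.drop (j + sL.length)) sL with - | ⟨t, ts⟩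
      · exact absurd h' hne
      · simp [pvIv]

-- ===== VERDICT (by name: the statement is the Claim_ definition above) =====
theorem split_but_retain_separator_spec : Claim_equal_split_but_retain_separator := by
  intro expr separator _ hpre
  unfold Spec_split_but_retain_separator split_but_retain_separator split_but_retain_separator_alt
  have hsepL : separator.toList ≠ [] := by
    intro h
    exact hpre (by rwa [← String.toList_eq_nil_iff])
  rw [if_neg hpre]
  have hsplit : PySem.Str.split? expr separator
      = some ((PySem.Chars.splitOn expr.toList separator.toList).map String.ofList) := by
    unfold PySem.Str.split? PySem.Chars.split?
    rw [if_neg (by simpa [List.isEmpty_iff] using hsepL)]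
    rfl
  rw [hsplit]
  simp only
  rw [pvBGo_eq_iv separator.toList hsepL expr.toList.length expr.toList le_rfl
      (expr.toList.length + 1) [] (by omega)]
  rw [show ((((PySem.Chars.splitOn expr.toList separator.toList).map String.ofList).length : Int) - 1)
      = 0 + (((PySem.Chars.splitOn expr.toList separator.toList).map String.ofList).length : Int) - 1 by omega]
  rw [pvALoop_eq_iv]
  rw [List.nil_append, List.nil_append, pvIv_map]
  simp
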